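-- pv_equiv track=rewrite | github.com/Sachchava/QuestionsSolved | Arrayss/kandane's algo.py | aa
-- ===== SOURCE A (Python) =====
-- def aa(a,p,m):
--     for i in range(0,len(a)):
--         p = p + a[i]
--         if p > m:
--             m = p
--         if p <= 0:
--             p = 0
--     return p
-- ===== SOURCE B (Python) =====
-- def aa(a, p, m):
--     if not a:
--         return p
--     run = 0
--     best = 0
--     for y in reversed(a[1:]):
--         run += y
--         best = max(best, run)
--     return max(best, p + run + a[0])
-- ===== Notes on version B (the rewrite author's own statement) =====
-- stated objective: alternative
-- what changed: Replaces the forward accumulate-and-reset loop by a single backward pass over the tail computing the maximum suffix sum floored at 0, with the initial offset p added only to the full-length suffix term.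
import Mathlib
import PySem

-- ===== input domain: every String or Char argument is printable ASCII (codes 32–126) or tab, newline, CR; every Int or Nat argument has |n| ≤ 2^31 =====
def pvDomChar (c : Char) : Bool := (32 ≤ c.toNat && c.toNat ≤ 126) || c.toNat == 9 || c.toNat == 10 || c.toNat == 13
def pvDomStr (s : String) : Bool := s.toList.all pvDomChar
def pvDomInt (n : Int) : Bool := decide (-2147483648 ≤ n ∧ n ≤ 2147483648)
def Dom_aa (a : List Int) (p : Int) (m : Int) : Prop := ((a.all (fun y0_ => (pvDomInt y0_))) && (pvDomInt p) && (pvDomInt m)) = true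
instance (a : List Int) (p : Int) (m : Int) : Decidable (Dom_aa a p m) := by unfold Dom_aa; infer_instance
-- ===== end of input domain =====

-- B replaces A's forward accumulate-and-reset loop by one backward pass computing
-- the maximum suffix sum floored at 0 (alternative decomposition, same cost).


-- ===== PORT A =====
-- the loop body: p += a[i]; if p > m: m = p; if p <= 0: p = 0
def aaStep (pm : Int × Int) (x : Int) : Int × Int :=
  let p1 := pm.1 + x
  let m1 := if p1 > pm.2 then p1 else pm.2
  (if p1 ≤ 0 then 0 else p1, m1)

def aa (a : List Int) (p : Int) (m : Int) : Int :=
  (List.foldl aaStep (p, m) a).1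

-- ===== PORT B =====
-- backward pass over the tail: (run, best) after each reversed element
def aa_alt (a : List Int) (p : Int) (m : Int) : Int :=
  match a with
  | [] => p
  | x :: rest =>
    let rb := List.foldl (fun (rb : Int × Int) y => (rb.1 + y, max rb.2 (rb.1 + y)))
                (0, 0) rest.reverse
    max rb.2 (p + rb.1 + x)

-- ===== PRECONDITION & SPEC =====
def Spec_aa (a : List Int) (p : Int) (m : Int) (out : Int) : Prop := out = aa_alt a p m
instance (a : List Int) (p : Int) (m : Int) (out : Int) : Decidable (Spec_aa a p m out) := by unfold Spec_aa; infer_instance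

-- ===== CLAIM (what is proved, stated in full; the proofs are below) =====
def Claim_equal_aa : Prop := ∀ (a : List Int) (p : Int) (m : Int), Dom_aa a p m → Spec_aa a p m (aa a p m)

-- ===== LEMMAS AND PROOFS =====

-- the backward scan, written as a foldr (equal to B's foldl over the reversed list)
def gScan (l : List Int) : Int × Int :=
  l.foldr (fun y rb => (rb.1 + y, max rb.2 (rb.1 + y))) (0, 0)

theorem gScan_eq (l : List Int) :
    List.foldl (fun (rb : Int × Int) y => (rb.1 + y, max rb.2 (rb.1 + y))) (0, 0) l.reverse
      = gScan l := by
  rw [List.foldl_reverse]; rfl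

theorem gScan_inv (l : List Int) : (gScan l).1 ≤ (gScan l).2 ∧ 0 ≤ (gScan l).2 := by
  induction l with
  | nil => simp [gScan]
  | cons y t ih =>
    simp only [gScan, List.foldr] at ih ⊢
    constructor
    · exact le_max_right _ _
    · exact le_trans ih.2 (le_max_left _ _)

theorem foldA_eq (l : List Int) : ∀ (q mm : Int), 0 ≤ q →
    (List.foldl aaStep (q, mm) l).1 = max (gScan l).2 (q + (gScan l).1) := by
  induction l with
  | nil => intro q mm hq; simp [gScan]; omega
  | cons y t ih =>
    intro q mm hq
    have hinv := gScan_inv t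
    simp only [List.foldl, gScan, List.foldr] at *
    rw [aaStep]
    by_cases h : q + y ≤ 0
    · simp only [h, if_pos]
      rw [ih 0 _ le_rfl]
      omega
    · simp only [h, if_neg, not_false_iff]
      rw [ih (q + y) _ (by omega)]
      omega

-- ===== VERDICT (by name: the statement is the Claim_ definition above) =====
theorem aa_spec : Claim_equal_aa := by
  intro a p m _
  unfold Spec_aa
  cases a with
  | nil => simp [aa, aa_alt]
  | cons x rest =>
    simp only [aa, aa_alt, List.foldl, gScan_eq]
    have hinv := gScan_inv rest
    rw [aaStep]
    by_cases h : p + x ≤ 0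
    · simp only [h, if_pos]
      rw [foldA_eq rest 0 _ le_rfl]
      omega
    · simp only [h, if_neg, not_false_iff]
      rw [foldA_eq rest (p + x) _ (by omega)]
      omega
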